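-- pv_equiv track=rewrite | github.com/doduydao/Quantum_Research | Graph_coloring/hamiltonian/utils.py | penalty_part
-- ===== SOURCE A (Python) =====
-- def penalty_part(state, n):
--     colors = list()
--     step = int(len(state) / n)
--     for i in range(0, len(state), step):
--         colors.append(state[i:i + step])
--
--     no_conflit = 0
--
--     for color in colors:
--         tmp = 0
--         for i in color:
--             tmp += int(i)
--         tmp = abs(tmp - 1)
--         no_conflit += tmp
--     return no_conflit
-- ===== SOURCE B (Python) =====
-- def penalty_part(state, n):
--     step = int(len(state) / n)
--     num = len(range(0, len(state), step))
--     totals = [0] * num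
--     if step > 0:
--         for pos, ch in enumerate(state):
--             totals[pos // step] += int(ch)
--     return sum(abs(t - 1) for t in totals)
-- ===== Notes on version B (the rewrite author's own statement) =====
-- stated objective: alternative
-- what changed: Replaces A's two-level structure (build a list of chunk slices, then sum each chunk in a nested loop) with a single flat pass over the state that accumulates each element into a chunk-indexed totals array via pos // step; it trades slice construction for per-element index arithmetic.
import Mathlib
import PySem

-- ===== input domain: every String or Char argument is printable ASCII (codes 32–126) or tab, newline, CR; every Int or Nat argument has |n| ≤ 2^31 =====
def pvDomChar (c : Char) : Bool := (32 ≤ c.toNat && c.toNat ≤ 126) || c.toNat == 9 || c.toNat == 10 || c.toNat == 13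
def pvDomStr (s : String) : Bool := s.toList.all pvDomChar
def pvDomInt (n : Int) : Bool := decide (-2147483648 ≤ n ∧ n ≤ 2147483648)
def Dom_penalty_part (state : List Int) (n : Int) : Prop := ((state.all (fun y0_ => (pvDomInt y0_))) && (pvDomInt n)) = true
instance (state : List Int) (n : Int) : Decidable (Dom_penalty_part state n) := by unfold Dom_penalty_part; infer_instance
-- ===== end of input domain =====

-- B replaces A's chunk-slice list and nested summing loops by one flat pass with a
-- chunk-indexed totals array (same cost class; no speed claim).

-- ===== PORT A =====
-- step = int(len(state)/n): exact as Int truncating division for |len|,|n| < 2^53 (PySem.Int.truncdiv)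
def penalty_part (state : List Int) (n : Int) : Int :=
  let step := PySem.Int.truncdiv (state.length : Int) n
  let colors := (PySem.List.pyRange 0 (state.length : Int) step).foldl
    (fun acc i => acc ++ [PySem.List.slice state (some i) (some (i + step))]) []
  colors.foldl (fun no_conflit color =>
    let tmp := color.foldl (fun t i => t + i) 0
    no_conflit + |tmp - 1|) 0

-- ===== PORT B =====
def penalty_part_alt (state : List Int) (n : Int) : Int :=
  let step := PySem.Int.truncdiv (state.length : Int) n
  let num := (PySem.List.pyRange 0 (state.length : Int) step).length
  let totals0 : List Int := List.replicate num 0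
  let totals :=
    if step > 0 then
      (PySem.List.enumerate state).foldl
        (fun ts pc =>
          PySem.List.pySetD ts (PySem.Int.floordiv pc.1 step)
            (PySem.List.pyGetD ts (PySem.Int.floordiv pc.1 step) 0 + pc.2)) totals0
    else totals0
  totals.foldl (fun s t => s + |t - 1|) 0

-- ===== PRECONDITION & SPEC =====
-- A raises ZeroDivisionError when n == 0 and ValueError (range step 0) when int(len(state)/n) == 0
-- (empty state, or fewer than |n| elements); exactly those inputs are excluded.
def Pre_penalty_part (state : List Int) (n : Int) : Prop :=
  n ≠ 0 ∧ PySem.Int.truncdiv (state.length : Int) n ≠ 0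
instance (state : List Int) (n : Int) : Decidable (Pre_penalty_part state n) := by
  unfold Pre_penalty_part; infer_instance
def pvWitness_penalty_part : List Int × Int := ([1, 0, 1, 0], 2)

def Spec_penalty_part (state : List Int) (n : Int) (out : Int) : Prop := out = penalty_part_alt state n
instance (state : List Int) (n : Int) (out : Int) : Decidable (Spec_penalty_part state n out) := by unfold Spec_penalty_part; infer_instance

-- ===== CLAIM (what is proved, stated in full; the proofs are below) =====
def Claim_equal_penalty_part : Prop := ∀ (state : List Int) (n : Int), Dom_penalty_part state n → Pre_penalty_part state n → Spec_penalty_part state n (penalty_part state n)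

-- ===== LEMMAS AND PROOFS =====

-- the list of per-chunk sums, chunk width t+1
def chunkSums (t : Nat) : List Int → List Int
  | [] => []
  | x :: xs => (x + (xs.take t).sum) :: chunkSums t (xs.drop t)
termination_by l => l.length
decreasing_by simp [List.length_drop]

@[simp] theorem chunkSums_nil (t : Nat) : chunkSums t [] = [] := by
  rw [chunkSums.eq_def]

theorem chunkSums_cons (t : Nat) (x : Int) (xs : List Int) :
    chunkSums t (x :: xs) = (x + (xs.take t).sum) :: chunkSums t (xs.drop t) := by
  rw [chunkSums.eq_def]

-- B's per-element update, at positive step S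
def updB (S : Int) (ts : List Int) (pc : Int × Int) : List Int :=
  PySem.List.pySetD ts (PySem.Int.floordiv pc.1 S)
    (PySem.List.pyGetD ts (PySem.Int.floordiv pc.1 S) 0 + pc.2)

theorem pyRange_neg_nil (L s : Int) (hL : 0 ≤ L) (hs : s < 0) :
    PySem.List.pyRange 0 L s = [] := by
  simp only [PySem.List.pyRange]
  rw [if_neg (by omega), if_neg (by omega), if_neg (by omega)]
  simp

-- A-side: the per-chunk sums written with drop/take over range c equal chunkSums
theorem mapA_eq_chunkSums (c : Nat) : ∀ (S : Nat) (l : List Int), 0 < S →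
    l.length ≤ c * S → (c = 0 ∨ c * S - S < l.length) →
    (List.range c).map (fun k => ((l.drop (S * k)).take S).sum) = chunkSums (S - 1) l := by
  induction c with
  | zero =>
      intro S l hS h1 _
      have hl : l = [] := by
        cases l with
        | nil => rfl
        | cons x xs => simp at h1
      subst hl; simp
  | succ c ih =>
      intro S l hS h1 h2
      have hx : (c + 1) * S = c * S + S := by ring
      have hlen : c * S < l.length := by rcases h2 with h | h <;> omega
      cases l with
      | nil => simp at hlen
      | cons x xs =>
        obtain ⟨S', rfl⟩ : ∃ S', S = S' + 1 := ⟨S - 1, by omega⟩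
        rw [List.range_succ_eq_map, List.map_cons, List.map_map, chunkSums_cons]
        have hhead : (((x :: xs).drop ((S' + 1) * 0)).take (S' + 1)).sum
            = x + (xs.take ((S' + 1) - 1)).sum := by
          simp
        rw [hhead]
        congr 1
        have hfun : ((fun k => (((x :: xs).drop ((S' + 1) * k)).take (S' + 1)).sum) ∘ Nat.succ)
            = fun k => (((xs.drop S').drop ((S' + 1) * k)).take (S' + 1)).sum := by
          funext k
          simp only [Function.comp, List.drop_drop]
          have h5 : (S' + 1) * (k + 1) = (S' + ((S' + 1) * k)) + 1 := by ring
          have h6 : S' + (S' + 1) * k = (S' + ((S' + 1) * k)) := by ring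
          rw [Nat.succ_eq_add_one, h5, h6, List.drop_succ_cons]
        rw [hfun]
        have hmul : S' + 1 ≤ c * (S' + 1) ∨ c = 0 := by
          rcases Nat.eq_zero_or_pos c with hc | hc
          · exact Or.inr hc
          · exact Or.inl (Nat.le_mul_of_pos_left _ hc)
        have hlx : (x :: xs).length = xs.length + 1 := by simp
        have := ih (S' + 1) (xs.drop S') hS
          (by simp only [List.length_drop]; omega)
          (by
            rcases Nat.eq_zero_or_pos c with hc | hc
            · exact Or.inl hc
            · right
              simp only [List.length_drop]
              omega)
        simpa using this

-- B-side: processing one chunk (positions j..j+len-1, all < S) accumulates into the head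
theorem updB_chunk (S : Nat) (hS : 0 < S) :
    ∀ (chunk : List Int) (j : Nat) (t : Int) (ts : List Int), j + chunk.length ≤ S →
    (PySem.List.enumerate chunk (j : Int)).foldl (updB (S : Int)) (t :: ts) =
      (t + chunk.sum) :: ts := by
  intro chunk
  induction chunk with
  | nil => intro j t ts _; simp [PySem.List.enumerate_nil]
  | cons x xs ih =>
      intro j t ts h
      rw [PySem.List.enumerate_cons, List.foldl_cons]
      have hj : j < S := by simp at h; omega
      have hstep : updB (S : Int) (t :: ts) (((j : Nat) : Int), x) = (t + x) :: ts := by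
        simp only [updB]
        rw [PySem.Int.floordiv_natCast j S, Nat.div_eq_of_lt hj]
        simp only [PySem.List.pySetD_natCast, PySem.List.pyGetD_natCast]
        simp
      rw [hstep]
      have hc : ((j : Nat) : Int) + 1 = (((j + 1 : Nat)) : Int) := by push_cast; ring
      rw [hc, ih (j + 1) (t + x) ts (by simp at h ⊢; omega)]
      simp [add_assoc]

-- B-side: positions shifted by S leave the head untouched
theorem updB_shift (S : Nat) (hS : 0 < S) :
    ∀ (rest : List Int) (o : Nat) (t : Int) (ts : List Int),
    (PySem.List.enumerate rest ((o + S : Nat) : Int)).foldl (updB (S : Int)) (t :: ts) =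
      t :: (PySem.List.enumerate rest ((o : Nat) : Int)).foldl (updB (S : Int)) ts := by
  intro rest
  induction rest with
  | nil => intro o t ts; simp [PySem.List.enumerate_nil]
  | cons x xs ih =>
      intro o t ts
      rw [PySem.List.enumerate_cons, PySem.List.enumerate_cons, List.foldl_cons, List.foldl_cons]
      have hd : (o + S) / S = o / S + 1 := Nat.add_div_right o hS
      have h1 : updB (S : Int) (t :: ts) (((o + S : Nat) : Int), x) =
          t :: updB (S : Int) ts (((o : Nat) : Int), x) := by
        simp only [updB]
        rw [PySem.Int.floordiv_natCast (o + S) S, PySem.Int.floordiv_natCast o S, hd]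
        simp only [PySem.List.pySetD_natCast, PySem.List.pyGetD_natCast]
        simp
      rw [h1]
      have h2 : ((o + S : Nat) : Int) + 1 = ((o + 1 + S : Nat) : Int) := by push_cast; ring
      have h3 : ((o : Nat) : Int) + 1 = ((o + 1 : Nat) : Int) := by push_cast; ring
      rw [h2, h3, ih (o + 1)]

-- B-side main lemma: the flat pass over enumerate builds the chunk sums
theorem foldB_eq_chunkSums (c : Nat) : ∀ (S : Nat) (l : List Int), 0 < S →
    l.length ≤ c * S → (c = 0 ∨ c * S - S < l.length) →
    (PySem.List.enumerate l 0).foldl (updB (S : Int)) (List.replicate c 0) =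
      chunkSums (S - 1) l := by
  induction c with
  | zero =>
      intro S l hS h1 _
      have hl : l = [] := by
        cases l with
        | nil => rfl
        | cons x xs => simp at h1
      subst hl; simp [PySem.List.enumerate_nil]
  | succ c ih =>
      intro S l hS h1 h2
      have hx : (c + 1) * S = c * S + S := by ring
      have hlen : c * S < l.length := by rcases h2 with h | h <;> omega
      have he : PySem.List.enumerate l 0 =
          PySem.List.enumerate (l.take S) 0 ++
            PySem.List.enumerate (l.drop S) (0 + ((l.take S).length : Int)) := by
        conv_lhs => rw [← List.take_append_drop S l]
        rw [PySem.List.enumerate_append]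
      rw [he, List.foldl_append, List.replicate_succ]
      have hfirst : (PySem.List.enumerate (l.take S) 0).foldl (updB (S : Int))
          (0 :: List.replicate c 0) = ((l.take S).sum) :: List.replicate c 0 := by
        have := updB_chunk S hS (l.take S) 0 0 (List.replicate c 0)
          (by simp only [Nat.zero_add, List.length_take]; omega)
        simpa using this
      rw [hfirst]
      by_cases hls : l.length ≤ S
      · have hc0 : c = 0 := by
          by_contra hc
          have : S ≤ c * S := Nat.le_mul_of_pos_left _ (Nat.pos_of_ne_zero hc)
          omega
        subst hc0
        rw [List.drop_eq_nil_of_le hls]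
        simp only [PySem.List.enumerate_nil, List.foldl_nil, List.replicate]
        cases l with
        | nil => simp at hlen
        | cons x xs =>
          rw [chunkSums_cons]
          have hxs : xs.length ≤ S - 1 := by simp at hls; omega
          rw [List.drop_eq_nil_of_le hxs, List.take_of_length_le (by omega),
            List.take_of_length_le hxs]
          simp
      · have htl : (l.take S).length = S := by simp [List.length_take]; omega
        rw [htl]
        have h4 : (0 : Int) + ((S : Nat) : Int) = (((0 + S : Nat)) : Int) := by push_cast; ring
        rw [h4, updB_shift S hS (l.drop S) 0]
        have hih := ih S (l.drop S) hS
          (by simp only [List.length_drop]; omega)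
          (by
            rcases Nat.eq_zero_or_pos c with hc | hc
            · exact Or.inl hc
            · right
              simp only [List.length_drop]
              have : S ≤ c * S := Nat.le_mul_of_pos_left _ hc
              omega)
        have h5 : (((0 : Nat)) : Int) = 0 := by simp
        rw [h5, hih]
        cases l with
        | nil => simp at hlen
        | cons x xs =>
          rw [chunkSums_cons]
          obtain ⟨S', rfl⟩ : ∃ S', S = S' + 1 := ⟨S - 1, by omega⟩
          simp [List.sum_cons]
  -- done

-- the chunk count of A's range and the two side conditions
theorem count_conds (Ln S : Nat) (hS : 0 < S) (hL : 0 < Ln) :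
    Ln ≤ ((Ln + S - 1) / S) * S ∧ ((Ln + S - 1) / S) * S - S < Ln := by
  have hmod := Nat.div_add_mod (Ln + S - 1) S
  have hr : (Ln + S - 1) % S < S := Nat.mod_lt _ hS
  rw [Nat.mul_comm] at hmod
  generalize (Ln + S - 1) / S * S = A at *
  generalize (Ln + S - 1) % S = r at *
  omega

-- ===== VERDICT (by name: the statement is the Claim_ definition above) =====
theorem penalty_part_spec : Claim_equal_penalty_part := by
  intro state n _ hpre
  obtain ⟨hn, hs⟩ := hpre
  unfold Spec_penalty_part
  set s := PySem.Int.truncdiv (state.length : Int) n with hsdef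
  rcases lt_trichotomy s 0 with hneg | hzero | hpos
  · -- negative step: both sides are 0
    simp only [penalty_part, penalty_part_alt, ← hsdef]
    rw [pyRange_neg_nil _ _ (by positivity) hneg]
    simp [if_neg (by omega : ¬ s > 0)]
  · exact absurd hzero hs
  · -- positive step
    have hL0 : 0 < state.length := by
      by_contra h
      have : state.length = 0 := by omega
      rw [hsdef] at hpos
      simp [this, PySem.Int.truncdiv] at hpos
    obtain ⟨S, hScast⟩ : ∃ S : Nat, s = (S : Int) := ⟨s.toNat, (Int.toNat_of_nonneg (by omega)).symm⟩
    have hSpos : 0 < S := by omega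
    set Ln := state.length with hLn
    set c : Nat := (Ln + S - 1) / S with hc
    -- the range is the mapped List.range c
    have hrange : PySem.List.pyRange 0 (Ln : Int) s =
        (List.range c).map (fun k : Nat => 0 + s * (k : Int)) := by
      have hcount : (if (0 : Int) < (Ln : Int) then (((Ln : Int) - 0 + s - 1) / s).toNat else 0)
          = c := by
        rw [if_pos (by exact_mod_cast hL0)]
        have he1 : ((Ln : Int) - 0 + s - 1) = ((Ln + S - 1 : Nat) : Int) := by
          rw [hScast]
          have h7 : ((Ln + S - 1 : Nat) : Int) = (Ln : Int) + (S : Int) - 1 := by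
            push_cast [Nat.cast_sub (by omega : 1 ≤ Ln + S)]; ring
          rw [h7]; ring
        rw [he1, hScast, ← Int.natCast_div, Int.toNat_natCast]
      rw [PySem.List.pyRange_of_pos 0 (Ln : Int) hpos, hcount]
    obtain ⟨hc1, hc2⟩ := count_conds Ln S hSpos hL0
    have hconds : Ln ≤ c * S ∧ (c = 0 ∨ c * S - S < Ln) := ⟨hc1, Or.inr hc2⟩
    -- A side
    have hA : penalty_part state n =
        (chunkSums (S - 1) state).foldl (fun nc t => nc + |t - 1|) 0 := by
      simp only [penalty_part, ← hsdef, ← hLn, hrange]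
      rw [PySem.List.foldl_append_singleton_eq_map, List.nil_append, List.map_map,
        List.foldl_map]
      simp only [Function.comp_apply]
      have hfun : ∀ k : Nat,
          (PySem.List.slice state (some (0 + s * (k : Int))) (some (0 + s * (k : Int) + s))).foldl
            (fun t i => t + i) 0 = ((state.drop (S * k)).take S).sum := by
        intro k
        have e1 : (0 : Int) + s * (k : Int) = ((S * k : Nat) : Int) := by
          rw [hScast]; push_cast; ring
        rw [e1, hScast, PySem.List.slice_natCast_add state (S * k) S, ← List.sum_eq_foldl]
      have : (fun (acc : Int) (k : Nat) =>
          acc + |(PySem.List.slice state (some (0 + s * (k : Int)))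
              (some (0 + s * (k : Int) + s))).foldl (fun t i => t + i) 0 - 1|) =
          (fun (acc : Int) (k : Nat) => acc + |((state.drop (S * k)).take S).sum - 1|) := by
        funext acc k; rw [hfun k]
      rw [this]
      have hmap := mapA_eq_chunkSums c S state hSpos hconds.1 hconds.2
      rw [← hmap, List.foldl_map]
    -- B side
    have hB : penalty_part_alt state n =
        (chunkSums (S - 1) state).foldl (fun nc t => nc + |t - 1|) 0 := by
      simp only [penalty_part_alt, ← hsdef, ← hLn, hrange]
      rw [if_pos hpos]
      have hnum : ((List.range c).map (fun k : Nat => 0 + s * (k : Int))).length = c := by simp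
      rw [hnum]
      have hupd : (fun (ts : List Int) (pc : Int × Int) =>
          PySem.List.pySetD ts (PySem.Int.floordiv pc.1 s)
            (PySem.List.pyGetD ts (PySem.Int.floordiv pc.1 s) 0 + pc.2)) = updB s := by
        funext ts pc; rfl
      rw [hupd, hScast, foldB_eq_chunkSums c S state hSpos hconds.1 hconds.2]
    rw [hA, hB]
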